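-- pv_equiv track=rewrite | github.com/Fedy1661/Informatics-EGE-2022 | 23/142/code.py | f
-- ===== SOURCE A (Python) =====
-- actions = [lambda x: x + 1, lambda x: x + 2, lambda x: x * 3]
--
-- def f(start, x):
--     if start > x: return 0
--     elif start == x: return 1
--     elif start == 14: return 0
--     total = 0
--     for i in actions:
--         total += f(i(start), x)
--     return total
-- ===== SOURCE B (Python) =====
-- def f(start, x):
--     if start > x:
--         return 0
--     if start == x:
--         return 1
--     ways = {x: 1}
--     for v in range(x - 1, start - 1, -1):
--         ways[v] = 0 if v == 14 else ways.get(v + 1, 0) + ways.get(v + 2, 0) + ways.get(3 * v, 0)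
--     return ways.get(start, 0)
-- ===== Notes on version B (the rewrite author's own statement) =====
-- stated objective: alternative
-- what changed: replaced the exponential three-way recursion by a bottom-up dynamic program that fills a dict of path counts from x down to start in one linear pass
import Mathlib
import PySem

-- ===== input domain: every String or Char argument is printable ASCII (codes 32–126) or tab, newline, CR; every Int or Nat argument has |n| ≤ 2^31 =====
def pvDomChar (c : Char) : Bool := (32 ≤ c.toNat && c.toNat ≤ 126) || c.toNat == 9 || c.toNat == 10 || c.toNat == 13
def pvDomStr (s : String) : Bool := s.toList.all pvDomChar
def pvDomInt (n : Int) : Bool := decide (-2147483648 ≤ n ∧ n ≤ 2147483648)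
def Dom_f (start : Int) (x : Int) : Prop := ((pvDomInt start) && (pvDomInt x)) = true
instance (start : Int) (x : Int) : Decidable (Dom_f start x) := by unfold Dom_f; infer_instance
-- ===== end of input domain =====

-- B replaces A's three-way recursion by a bottom-up dynamic program: one linear pass
-- filling a dict of path counts from x down to start.

-- ===== PORT A =====
-- A's recursion diverges when start ≤ 0 < x (the *3 action never increases such a start), so
-- the port carries a fuel argument that is sufficient on Pre_f; outside Pre_f nothing is claimed.
def fA : Nat → Int → Int → Int
  | 0, _, _ => 0
  | n + 1, start, x =>
    if start > x then 0
    else if start = x then 1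
    else if start = 14 then 0
    else fA n (start + 1) x + fA n (start + 2) x + fA n (start * 3) x

def f (start : Int) (x : Int) : Int := fA ((x - start).toNat + 1) start x

-- ===== PORT B =====
def f_alt (start : Int) (x : Int) : Int :=
  if start > x then 0
  else if start = x then 1
  else
    let ways := (PySem.List.pyRange (x - 1) (start - 1) (-1)).foldl
      (fun d v => d.insert v
        (if v = 14 then 0 else d.getD (v + 1) 0 + d.getD (v + 2) 0 + d.getD (3 * v) 0))
      ((PySem.Dict.empty).insert x 1)
    ways.getD start 0

-- ===== PRECONDITION & SPEC =====
-- Pre_f excludes start ≤ 0 < x, where A's recursion never terminates (Python RecursionError):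
-- the *3 action does not increase a non-positive start, so the call tree is infinite there.
def Pre_f (start : Int) (x : Int) : Prop := 1 ≤ start ∨ x ≤ start
instance (start : Int) (x : Int) : Decidable (Pre_f start x) := by unfold Pre_f; infer_instance
def pvWitness_f : Int × Int := (1, 10)

def Spec_f (start : Int) (x : Int) (out : Int) : Prop := out = f_alt start x
instance (start : Int) (x : Int) (out : Int) : Decidable (Spec_f start x out) := by unfold Spec_f; infer_instance

-- ===== CLAIM (what is proved, stated in full; the proofs are below) =====
def Claim_equal_f : Prop := ∀ (start : Int) (x : Int), Dom_f start x → Pre_f start x → Spec_f start x (f start x)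

-- ===== LEMMAS AND PROOFS =====

lemma fA_succ (n : Nat) (start x : Int) :
    fA (n + 1) start x
      = if start > x then 0
        else if start = x then 1
        else if start = 14 then 0
        else fA n (start + 1) x + fA n (start + 2) x + fA n (start * 3) x := rfl

-- enough fuel: the value of fA does not depend on the fuel once it exceeds the gap
lemma fA_fuel : ∀ (n m : Nat) (start x : Int), 1 ≤ start →
    (x - start).toNat < n → (x - start).toNat < m → fA n start x = fA m start x := by
  intro n
  induction n with
  | zero => intro m start x _ h _; omega
  | succ n ih =>
    intro m start x hs hn hm
    obtain ⟨m', rfl⟩ : ∃ m', m = m' + 1 := ⟨m - 1, by omega⟩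
    rw [fA_succ, fA_succ]
    split_ifs with h1 h2 h3
    · rfl
    · rfl
    · rfl
    · rw [ih m' (start + 1) x (by omega) (by omega) (by omega),
          ih m' (start + 2) x (by omega) (by omega) (by omega),
          ih m' (start * 3) x (by omega) (by omega) (by omega)]

lemma f_of_gt (start x : Int) (h : x < start) : f start x = 0 := by
  simp [f, fA, h]

lemma f_self (x : Int) : f x x = 1 := by
  simp [f, fA]

lemma f_14 (x : Int) (h : 14 < x) : f 14 x = 0 := by
  rw [f, fA_succ, if_neg (by omega), if_neg (by omega), if_pos rfl]

lemma f_rec (v x : Int) (h1 : 1 ≤ v) (h2 : v < x) (h3 : v ≠ 14) :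
    f v x = f (v + 1) x + f (v + 2) x + f (v * 3) x := by
  have hgap : (x - v).toNat + 1 = ((x - v).toNat - 1 + 1) + 1 := by omega
  rw [f, hgap, fA_succ, if_neg (by omega), if_neg (by omega), if_neg h3]
  unfold f
  rw [fA_fuel ((x - v).toNat - 1 + 1) ((x - (v + 1)).toNat + 1) (v + 1) x (by omega) (by omega) (by omega),
      fA_fuel ((x - v).toNat - 1 + 1) ((x - (v + 2)).toNat + 1) (v + 2) x (by omega) (by omega) (by omega),
      fA_fuel ((x - v).toNat - 1 + 1) ((x - v * 3).toNat + 1) (v * 3) x (by omega) (by omega) (by omega)]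

-- the DP loop invariant: after processing x-1 down to w, the dict holds f u x on [w, x] exactly
lemma dp_inv (x : Int) : ∀ (k : Nat) (w : Int), 1 ≤ w → w + (k : Int) = x → ∀ (u : Int),
    ((PySem.List.pyRange (x - 1) (w - 1) (-1)).foldl
      (fun d v => d.insert v
        (if v = 14 then 0 else d.getD (v + 1) 0 + d.getD (v + 2) 0 + d.getD (3 * v) 0))
      ((PySem.Dict.empty).insert x 1)).getD u 0
      = if w ≤ u ∧ u ≤ x then f u x else 0 := by
  intro k
  induction k with
  | zero =>
    intro w hw hwx u
    have hx : w = x := by omega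
    subst hx
    rw [PySem.List.pyRange_neg_one_eq_nil (by omega)]
    simp only [List.foldl_nil, PySem.Dict.getD_insert, PySem.Dict.getD_empty]
    by_cases hu : u = w
    · subst hu; rw [if_pos rfl, if_pos ⟨le_refl u, le_refl u⟩, f_self]
    · rw [if_neg hu, if_neg (by omega)]
  | succ k ih =>
    intro w hw hwx u
    have hsplit : PySem.List.pyRange (x - 1) (w - 1) (-1)
        = PySem.List.pyRange (x - 1) w (-1) ++ [w] := by
      rw [PySem.List.pyRange_neg_one_eq_reverse, PySem.List.pyRange_neg_one_eq_reverse,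
          show w - 1 + 1 = w by ring, PySem.List.pyRange_one_cons (by omega)]
      simp
    have IH : ∀ (u : Int), ((PySem.List.pyRange (x - 1) w (-1)).foldl
        (fun d v => d.insert v
          (if v = 14 then 0 else d.getD (v + 1) 0 + d.getD (v + 2) 0 + d.getD (3 * v) 0))
        ((PySem.Dict.empty).insert x 1)).getD u 0
        = if w + 1 ≤ u ∧ u ≤ x then f u x else 0 := by
      intro u
      have h := ih (w + 1) (by omega) (by omega) u
      rwa [show w + 1 - 1 = w by ring] at h
    rw [hsplit, List.foldl_append]
    simp only [List.foldl_cons, List.foldl_nil]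
    rw [PySem.Dict.getD_insert]
    simp only [IH]
    by_cases hu : u = w
    · subst hu
      have hval : (if u = 14 then (0:Int) else
            (if u + 1 ≤ u + 1 ∧ u + 1 ≤ x then f (u + 1) x else 0)
            + (if u + 1 ≤ u + 2 ∧ u + 2 ≤ x then f (u + 2) x else 0)
            + (if u + 1 ≤ 3 * u ∧ 3 * u ≤ x then f (3 * u) x else 0)) = f u x := by
        by_cases h14 : u = 14
        · subst h14
          rw [if_pos rfl, f_14 x (by omega)]
        · have e1 : (if u + 1 ≤ u + 1 ∧ u + 1 ≤ x then f (u + 1) x else 0) = f (u + 1) x :=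
            if_pos ⟨le_refl _, by omega⟩
          have e2 : (if u + 1 ≤ u + 2 ∧ u + 2 ≤ x then f (u + 2) x else 0) = f (u + 2) x := by
            by_cases h : u + 2 ≤ x
            · exact if_pos ⟨by omega, h⟩
            · rw [if_neg (by omega), f_of_gt _ _ (by omega)]
          have e3 : (if u + 1 ≤ 3 * u ∧ 3 * u ≤ x then f (3 * u) x else 0) = f (u * 3) x := by
            by_cases h : 3 * u ≤ x
            · rw [if_pos ⟨by omega, h⟩, show 3 * u = u * 3 by ring]
            · rw [if_neg (by omega), f_of_gt _ _ (by omega)]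
          rw [if_neg h14, e1, e2, e3, f_rec u x hw (by omega) h14]
      rw [if_pos rfl, hval, if_pos (show u ≤ u ∧ u ≤ x from ⟨le_refl u, by omega⟩)]
    · rw [if_neg hu]
      by_cases h : w ≤ u ∧ u ≤ x
      · rw [if_pos ⟨by omega, h.2⟩, if_pos h]
      · rw [if_neg (fun hc => h ⟨by omega, hc.2⟩), if_neg h]

-- ===== VERDICT (by name: the statement is the Claim_ definition above) =====
theorem f_spec : Claim_equal_f := by
  intro start x _ hpre
  unfold Spec_f f_alt
  split_ifs with h1 h2
  · exact f_of_gt start x h1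
  · subst h2; exact f_self start
  · have hs : 1 ≤ start := by rcases hpre with h | h <;> omega
    have hinv := dp_inv x (x - start).toNat start hs (by omega) start
    rw [hinv, if_pos ⟨le_refl _, by omega⟩]
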